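-- pv_equiv track=rewrite | github.com/prachibarnwal/python-codes | 312.)function accpeting a list of marks and return a new list of grades.py | NEWYEAR
-- ===== SOURCE A (Python) =====
-- def NEWYEAR(l):
--     g = []
--     for ch in l:
--         if ch > 90:
--             g.append('A')
--         elif ch > 80:
--             g.append('B')
--         elif ch > 70:
--             g.append('C')
--         elif ch > 60:
--             g.append('D')
--         else:
--             g.append('>_<')
--     return g
-- ===== SOURCE B (Python) =====
-- def NEWYEAR(l):
--     out = []
--     for m in l:
--         if m > 60:
--             out.append(chr(74 - min((m - 1) // 10, 9)))
--         else:
--             out.append('>_<')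
--     return out
-- ===== Notes on version B (the rewrite author's own statement) =====
-- stated objective: alternative
-- what changed: Replaces the four-way comparison cascade with arithmetic: the grade character is computed directly as chr(74 - min((m-1)//10, 9)) for m > 60, so there is a single threshold test and no per-grade branching.
import Mathlib
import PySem

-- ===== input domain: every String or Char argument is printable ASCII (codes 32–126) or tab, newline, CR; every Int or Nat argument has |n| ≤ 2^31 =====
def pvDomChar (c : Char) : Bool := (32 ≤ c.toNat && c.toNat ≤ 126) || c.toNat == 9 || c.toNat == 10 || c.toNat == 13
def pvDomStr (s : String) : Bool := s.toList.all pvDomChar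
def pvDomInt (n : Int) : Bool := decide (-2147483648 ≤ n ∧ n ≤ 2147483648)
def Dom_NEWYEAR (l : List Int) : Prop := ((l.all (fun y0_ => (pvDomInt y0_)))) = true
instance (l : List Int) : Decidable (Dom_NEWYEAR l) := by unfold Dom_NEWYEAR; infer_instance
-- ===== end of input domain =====

-- B computes each grade arithmetically (chr(74 - min((m-1)//10, 9)) for m > 60) instead of A's
-- four-way comparison cascade; objective: alternative.

-- ===== PORT A =====
-- literal transliteration: accumulator list g, appended per element, branch order preserved
def NEWYEAR (l : List Int) : List String :=
  l.foldl (fun g ch =>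
    if ch > 90 then g ++ ["A"]
    else if ch > 80 then g ++ ["B"]
    else if ch > 70 then g ++ ["C"]
    else if ch > 60 then g ++ ["D"]
    else g ++ [">_<"]) []

-- ===== PORT B =====
-- transliteration of Source B: one loop with an out accumulator; the grade character is
-- chr(74 - min((m-1)//10, 9)) when m > 60, else '>_<'
def NEWYEAR_alt (l : List Int) : List String :=
  l.foldl (fun out m =>
    if m > 60 then
      out ++ [String.mk [Char.ofNat (74 - min (PySem.Int.floordiv (m - 1) 10) 9).toNat]]
    else out ++ [">_<"]) []

-- ===== PRECONDITION & SPEC =====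
def Spec_NEWYEAR (l : List Int) (out : List String) : Prop := out = NEWYEAR_alt l
instance (l : List Int) (out : List String) : Decidable (Spec_NEWYEAR l out) := by unfold Spec_NEWYEAR; infer_instance

-- ===== CLAIM (what is proved, stated in full; the proofs are below) =====
def Claim_equal_NEWYEAR : Prop := ∀ (l : List Int), Dom_NEWYEAR l → Spec_NEWYEAR l (NEWYEAR l)

-- ===== LEMMAS AND PROOFS =====

-- the arithmetic grade equals the cascade grade, for every Int mark
lemma grade_eq (m : Int) :
    (if m > 60 then
       String.mk [Char.ofNat (74 - min (PySem.Int.floordiv (m - 1) 10) 9).toNat]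
     else ">_<")
    = (if m > 90 then "A" else if m > 80 then "B" else if m > 70 then "C"
       else if m > 60 then "D" else ">_<") := by
  rw [PySem.Int.floordiv_eq_ediv_of_pos (by norm_num : (0:Int) < 10)]
  by_cases h1 : m > 90
  · rw [if_pos (by omega : m > 60), if_pos h1]
    have hq : min ((m - 1) / 10) 9 = 9 := by omega
    rw [hq]; rfl
  · by_cases h2 : m > 80
    · rw [if_pos (by omega : m > 60), if_neg h1, if_pos h2]
      have hq : min ((m - 1) / 10) 9 = 8 := by omega
      rw [hq]; rfl
    · by_cases h3 : m > 70
      · rw [if_pos (by omega : m > 60), if_neg h1, if_neg h2, if_pos h3]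
        have hq : min ((m - 1) / 10) 9 = 7 := by omega
        rw [hq]; rfl
      · by_cases h4 : m > 60
        · rw [if_pos h4, if_neg h1, if_neg h2, if_neg h3, if_pos h4]
          have hq : min ((m - 1) / 10) 9 = 6 := by omega
          rw [hq]; rfl
        · rw [if_neg h4, if_neg h1, if_neg h2, if_neg h3, if_neg h4]

-- the two step functions agree, hence the folds agree
lemma step_eq :
    (fun (out : List String) (m : Int) =>
      if m > 60 then
        out ++ [String.mk [Char.ofNat (74 - min (PySem.Int.floordiv (m - 1) 10) 9).toNat]]
      else out ++ [">_<"])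
    = (fun (g : List String) (ch : Int) =>
      if ch > 90 then g ++ ["A"]
      else if ch > 80 then g ++ ["B"]
      else if ch > 70 then g ++ ["C"]
      else if ch > 60 then g ++ ["D"]
      else g ++ [">_<"]) := by
  funext g m
  have h := grade_eq m
  split_ifs at h ⊢ <;> simp_all

-- ===== VERDICT (by name: the statement is the Claim_ definition above) =====
theorem NEWYEAR_spec : Claim_equal_NEWYEAR := by
  intro l _
  unfold Spec_NEWYEAR NEWYEAR NEWYEAR_alt
  rw [step_eq]
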